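-- pv_equiv track=rewrite | github.com/assafzimand/NCC-PINN | experiments_analysis/scripts/analyze_capacity_experiment.py | get_all_metrics_violated_by_model
-- ===== SOURCE A (Python) =====
-- from typing import Dict, List, Optional, Any, Tuple
-- from collections import defaultdict
--
-- def get_all_metrics_violated_by_model(
--     all_violations: Dict[str, List[Dict[str, Any]]]
-- ) -> Dict[str, List[str]]:
--     """Get list of metrics violated by each model.
--
--     Returns:
--         Dict mapping model_name -> list of metric names violated
--     """
--     model_metrics = defaultdict(set)
--     for metric_name, violations in all_violations.items():
--         for v in violations:
--             model_metrics[v['model_name']].add(metric_name)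
--     return {k: sorted(list(v)) for k, v in model_metrics.items()}
-- ===== SOURCE B (Python) =====
-- def get_all_metrics_violated_by_model(all_violations):
--     """Get list of metrics violated by each model (flatten-then-group decomposition)."""
--     pairs = [(v['model_name'], metric) for metric, vs in all_violations.items() for v in vs]
--     order = list(dict.fromkeys(name for name, _ in pairs))
--     return {name: sorted({metric for n, metric in pairs if n == name}) for name in order}
-- ===== Notes on version B (the rewrite author's own statement) =====
-- stated objective: alternative
-- what changed: Replaces the defaultdict-of-sets accumulation with a flatten-to-(model,metric)-pairs comprehension, a dict.fromkeys pass for first-appearance model order, and a per-model filter+set+sort to build each value.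
-- outside the precondition, e.g. on get_all_metrics_violated_by_model({'mse': [{'x': 'y'}]}): A raises KeyError, B raises KeyError
import Mathlib
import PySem

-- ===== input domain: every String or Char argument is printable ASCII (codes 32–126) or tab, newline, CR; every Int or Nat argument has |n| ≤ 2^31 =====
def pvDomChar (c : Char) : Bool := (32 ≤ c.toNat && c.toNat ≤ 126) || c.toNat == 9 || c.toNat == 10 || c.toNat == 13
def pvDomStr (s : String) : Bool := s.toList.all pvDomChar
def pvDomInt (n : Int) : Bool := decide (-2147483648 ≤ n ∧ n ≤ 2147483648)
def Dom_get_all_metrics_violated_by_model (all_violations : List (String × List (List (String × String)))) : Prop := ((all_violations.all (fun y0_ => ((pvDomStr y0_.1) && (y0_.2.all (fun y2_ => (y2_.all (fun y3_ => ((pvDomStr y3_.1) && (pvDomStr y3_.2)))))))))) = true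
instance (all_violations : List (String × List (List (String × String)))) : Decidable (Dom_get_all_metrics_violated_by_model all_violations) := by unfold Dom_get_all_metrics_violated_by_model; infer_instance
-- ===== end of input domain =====

-- B replaces A's defaultdict-of-sets accumulation with a flatten/dedup-order/filter-per-model
-- decomposition of the same cost (objective: alternative).

-- ===== PORT A =====
-- v['model_name']: under Pre_ the key is present, so getD with "" is exact (Python raises KeyError outside Pre_).
def get_all_metrics_violated_by_model (all_violations : List (String × List (List (String × String)))) : List (String × List String) :=
  let model_metrics : PySem.Dict String (PySem.Set String) :=
    all_violations.foldl (fun d p =>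
      p.2.foldl (fun d v =>
        d.insert ((PySem.Dict.mk v).getD "model_name" "")
          (PySem.Set.add (d.getD ((PySem.Dict.mk v).getD "model_name" "") PySem.Set.empty) p.1)) d)
      PySem.Dict.empty
  model_metrics.items.map (fun kv => (kv.1, PySem.List.sorted kv.2 (fun x => x) false))

-- ===== PORT B =====
-- same KeyError point as Source B: under Pre_ getD "" is exact.
def get_all_metrics_violated_by_model_alt (all_violations : List (String × List (List (String × String)))) : List (String × List String) :=
  let pairs : List (String × String) :=
    all_violations.flatMap (fun p => p.2.map (fun v => ((PySem.Dict.mk v).getD "model_name" "", p.1)))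
  let order : List String := PySem.List.dedup (pairs.map (·.1))
  order.map (fun name =>
    (name, PySem.List.sorted (PySem.Set.ofList ((pairs.filter (fun q => q.1 == name)).map (·.2))) (fun x => x) false))

-- ===== PRECONDITION & SPEC =====
-- Pre_ excludes exactly the inputs where some violation dict lacks the 'model_name' key: there both A and B raise KeyError.
def Pre_get_all_metrics_violated_by_model (all_violations : List (String × List (List (String × String)))) : Prop :=
  ∀ p ∈ all_violations, ∀ v ∈ p.2, "model_name" ∈ v.map Prod.fst
instance (all_violations : List (String × List (List (String × String)))) : Decidable (Pre_get_all_metrics_violated_by_model all_violations) := by unfold Pre_get_all_metrics_violated_by_model; infer_instance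
def pvWitness_get_all_metrics_violated_by_model : (List (String × List (List (String × String)))) :=
  [("mse", [[("model_name", "m1")], [("model_name", "m2")]]), ("mae", [[("model_name", "m1")]])]
def Spec_get_all_metrics_violated_by_model (all_violations : List (String × List (List (String × String)))) (out : List (String × List String)) : Prop := out = get_all_metrics_violated_by_model_alt all_violations
instance (all_violations : List (String × List (List (String × String)))) (out : List (String × List String)) : Decidable (Spec_get_all_metrics_violated_by_model all_violations out) := by unfold Spec_get_all_metrics_violated_by_model; infer_instance

-- ===== CLAIM (what is proved, stated in full; the proofs are below) =====
def Claim_equal_get_all_metrics_violated_by_model : Prop := ∀ (all_violations : List (String × List (List (String × String)))), Dom_get_all_metrics_violated_by_model all_violations → Pre_get_all_metrics_violated_by_model all_violations → Spec_get_all_metrics_violated_by_model all_violations (get_all_metrics_violated_by_model all_violations)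

-- ===== LEMMAS AND PROOFS =====

-- the grouping step both ports share, over a flat (model, metric) pair
def pvStep (d : PySem.Dict String (PySem.Set String)) (q : String × String) : PySem.Dict String (PySem.Set String) :=
  d.insert q.1 (PySem.Set.add (d.getD q.1 PySem.Set.empty) q.2)

-- A's nested fold is the fold of pvStep over the flattened pairs
theorem pv_fold_flat (l : List (String × List (List (String × String)))) (d : PySem.Dict String (PySem.Set String)) :
    l.foldl (fun d p =>
      p.2.foldl (fun d v =>
        d.insert ((PySem.Dict.mk v).getD "model_name" "")
          (PySem.Set.add (d.getD ((PySem.Dict.mk v).getD "model_name" "") PySem.Set.empty) p.1)) d) d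
    = (l.flatMap (fun p => p.2.map (fun v => ((PySem.Dict.mk v).getD "model_name" "", p.1)))).foldl pvStep d := by
  induction l generalizing d with
  | nil => rfl
  | cons p rest ih =>
    simp only [List.foldl_cons, List.flatMap_cons, List.foldl_append, ih, List.foldl_map]
    rfl

theorem pv_getD_fold (pairs : List (String × String)) (d : PySem.Dict String (PySem.Set String)) (n : String) :
    (pairs.foldl pvStep d).getD n PySem.Set.empty
      = PySem.Set.update (d.getD n PySem.Set.empty) ((pairs.filter (fun q => q.1 == n)).map (·.2)) := by
  induction pairs generalizing d with
  | nil => rfl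
  | cons q rest ih =>
    simp only [List.foldl_cons, List.filter_cons, ih]
    by_cases h : q.1 = n
    · subst h
      simp [pvStep, PySem.Dict.getD_insert_self, PySem.Set.update_cons]
    · simp [pvStep, PySem.Dict.getD_insert_of_ne (hne := Ne.symm h), beq_false_of_ne h]

theorem pv_keys_fold (pairs : List (String × String)) :
    (pairs.foldl pvStep PySem.Dict.empty).keys = PySem.Set.ofList (pairs.map (·.1)) := by
  have h := PySem.Dict.keys_foldl_insert_key (κ := String) (β := String × String) pairs (·.1)
      (fun d q => PySem.Set.add (d.getD q.1 PySem.Set.empty) q.2) PySem.Dict.empty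
  simpa [pvStep, PySem.Dict.keys_empty, PySem.Set.update_empty] using h

theorem pv_nodup_keys_fold (pairs : List (String × String)) :
    (pairs.foldl pvStep PySem.Dict.empty).keys.Nodup := by
  rw [pv_keys_fold]; exact PySem.Set.nodup_ofList _

theorem pv_items_fold (pairs : List (String × String)) :
    (pairs.foldl pvStep PySem.Dict.empty).items
      = (PySem.Set.ofList (pairs.map (·.1))).map
          (fun n => (n, PySem.Set.ofList ((pairs.filter (fun q => q.1 == n)).map (·.2)))) := by
  rw [PySem.Dict.items_eq_map_keys _ (pv_nodup_keys_fold pairs) PySem.Set.empty, pv_keys_fold]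
  refine List.map_congr_left (fun n _ => ?_)
  rw [pv_getD_fold]
  simp [PySem.Dict.getD_empty, PySem.Set.update_nil_left]

-- ===== VERDICT (by name: the statement is the Claim_ definition above) =====
theorem get_all_metrics_violated_by_model_spec : Claim_equal_get_all_metrics_violated_by_model := by
  intro av _ _
  unfold Spec_get_all_metrics_violated_by_model get_all_metrics_violated_by_model get_all_metrics_violated_by_model_alt
  simp only [pv_fold_flat, pv_items_fold, List.map_map, PySem.List.dedup_eq_ofList]
  rfl
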